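-- pv_equiv track=rewrite | github.com/porapalmy/cs-security-comps-2026 | manual-rule-lab/pipeline.py | token_is_yara_friendly
-- ===== SOURCE A (Python) =====
-- def token_is_yara_friendly(token: str) -> bool:
--     if len(token) < 4 or len(token) > 80:
--         return False
--     if any(ch in token for ch in ["\n", "\r", "\t", "\x00"]):
--         return False
--     if token.count("/") > 6:
--         return False
--     return True
-- ===== SOURCE B (Python) =====
-- def token_is_yara_friendly(token: str) -> bool:
--     if len(token) < 4 or len(token) > 80:
--         return False
--     slashes = 0
--     for ch in token:
--         if ch in "\n\r\t\x00":
--             return False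
--         if ch == "/":
--             slashes += 1
--             if slashes > 6:
--                 return False
--     return True
-- ===== Notes on version B (the rewrite author's own statement) =====
-- stated objective: alternative
-- what changed: Replaced A's five separate scans (four substring membership sweeps plus a full slash count) by one single pass over the characters that keeps a running slash counter and exits early on a forbidden character or a seventh slash.
import Mathlib
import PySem

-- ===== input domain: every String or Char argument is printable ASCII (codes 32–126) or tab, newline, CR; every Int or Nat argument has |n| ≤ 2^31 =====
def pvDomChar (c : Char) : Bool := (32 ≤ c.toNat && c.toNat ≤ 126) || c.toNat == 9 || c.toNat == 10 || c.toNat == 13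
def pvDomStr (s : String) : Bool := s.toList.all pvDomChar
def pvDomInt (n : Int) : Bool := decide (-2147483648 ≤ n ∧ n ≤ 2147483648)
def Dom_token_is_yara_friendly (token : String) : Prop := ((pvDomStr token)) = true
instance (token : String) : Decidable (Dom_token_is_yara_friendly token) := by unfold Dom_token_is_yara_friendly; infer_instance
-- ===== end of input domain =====

-- B replaces A's five separate scans (four membership sweeps and a .count) by one
-- single pass that keeps a running slash counter and exits early (objective: alternative).

-- ===== PORT A =====
def token_is_yara_friendly (token : String) : Bool :=
  if PySem.Str.len token < 4 || PySem.Str.len token > 80 then false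
  else if ["\n", "\r", "\t", "\x00"].any (fun ch => PySem.Str.isIn ch token) then false
  else if PySem.Str.count token "/" > 6 then false
  else true

-- ===== PORT B =====
def yaraScan : List Char → Nat → Bool
  | [], _ => true
  | c :: rest, slashes =>
    if c = '\n' || c = '\r' || c = '\t' || c = '\x00' then false
    else if c = '/' then
      if slashes + 1 > 6 then false else yaraScan rest (slashes + 1)
    else yaraScan rest slashes

def token_is_yara_friendly_alt (token : String) : Bool :=
  if PySem.Str.len token < 4 || PySem.Str.len token > 80 then false
  else yaraScan token.toList 0

-- ===== PRECONDITION & SPEC =====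
def Spec_token_is_yara_friendly (token : String) (out : Bool) : Prop := out = token_is_yara_friendly_alt token
instance (token : String) (out : Bool) : Decidable (Spec_token_is_yara_friendly token out) := by unfold Spec_token_is_yara_friendly; infer_instance

-- ===== CLAIM (what is proved, stated in full; the proofs are below) =====
def Claim_equal_token_is_yara_friendly : Prop := ∀ (token : String), Dom_token_is_yara_friendly token → Spec_token_is_yara_friendly token (token_is_yara_friendly token)

-- ===== LEMMAS AND PROOFS =====

-- B's single pass returns true iff no forbidden char occurs and the total slash count fits.
lemma yaraScan_eq (cs : List Char) (k : Nat) (hk : k ≤ 6) :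
    yaraScan cs k =
      (cs.all (fun c => !(c = '\n' || c = '\r' || c = '\t' || c = '\x00')) &&
        decide (k + cs.count '/' ≤ 6)) := by
  induction cs generalizing k with
  | nil => simp [yaraScan, hk]
  | cons c rest ih =>
    by_cases hf : c = '\n' ∨ c = '\r' ∨ c = '\t' ∨ c = '\x00'
    · rcases hf with h | h | h | h <;> subst h <;> simp [yaraScan]
    · push_neg at hf
      obtain ⟨h1, h2, h3, h4⟩ := hf
      by_cases hs : c = '/'
      · subst hs
        by_cases hkk : k + 1 > 6
        · have hle : ¬ (k + (rest.count '/' + 1) ≤ 6) := by omega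
          simp [yaraScan, hkk, hle]
        · have hcond : ((decide (('/' : Char) = '\n') || decide (('/' : Char) = '\r') ||
              decide (('/' : Char) = '\t') || decide (('/' : Char) = '\x00'))) = false := by decide
          simp only [yaraScan, hcond, Bool.false_eq_true, if_false, if_pos rfl, if_neg hkk]
          rw [ih (k + 1) (by omega)]
          have : k + 1 + rest.count '/' = k + ((rest.count '/') + 1) := by omega
          simp [List.count_cons, this]
      · simp [yaraScan, h1, h2, h3, h4, hs, ih k hk, List.count_cons]

-- non-overlapping substring count of a single character is List.count
lemma count_go_singleton (a : Char) (cs : List Char) (fuel acc : Nat)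
    (h : cs.length ≤ fuel) :
    PySem.Chars.count.go [a] fuel cs acc = acc + cs.count a := by
  induction fuel generalizing cs acc with
  | zero =>
    have : cs = [] := by
      cases cs with
      | nil => rfl
      | cons x xs => simp at h
    subst this; simp [PySem.Chars.count.go]
  | succ n ih =>
    cases cs with
    | nil => simp [PySem.Chars.count.go]
    | cons x xs =>
      have hlen : xs.length ≤ n := by simpa using h
      by_cases hx : x = a
      · subst hx
        simp only [PySem.Chars.count.go, List.isPrefixOf, beq_self_eq_true, Bool.true_and]
        simp only [List.isPrefixOf] at *
        simp [ih xs (acc + 1) hlen, List.count_cons]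
        omega
      · have hpre : List.isPrefixOf [a] (x :: xs) = false := by
          simp [List.isPrefixOf]
          exact fun hc => hx hc.symm
        simp only [PySem.Chars.count.go, hpre, Bool.false_eq_true, if_false]
        rw [ih xs acc hlen]
        simp [List.count_cons]
        intro hc; exact hx hc

lemma count_singleton_char (a : Char) (cs : List Char) :
    PySem.Chars.count cs [a] = cs.count a := by
  have := count_go_singleton a cs cs.length 0 le_rfl
  simpa [PySem.Chars.count, List.isEmpty] using this

lemma isIn_singleton_chars (a : Char) (l : List Char) :
    PySem.Chars.isIn [a] l = l.contains a := by
  by_cases h : a ∈ l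
  · have : PySem.Chars.isIn [a] l = true := by
      rw [PySem.Chars.isIn_iff_infix]
      obtain ⟨pre, suf, hps⟩ := List.append_of_mem h
      exact ⟨pre, suf, by simp [hps]⟩
    simp [this, h]
  · have : PySem.Chars.isIn [a] l = false := by
      rw [PySem.Chars.isIn_eq_false_iff]
      intro hinf
      exact h (hinf.subset (by simp))
    simp [this, h]

-- ===== VERDICT (by name: the statement is the Claim_ definition above) =====
theorem token_is_yara_friendly_spec : Claim_equal_token_is_yara_friendly := by
  intro token _
  unfold Spec_token_is_yara_friendly token_is_yara_friendly token_is_yara_friendly_alt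
  by_cases hlen : PySem.Str.len token < 4 || PySem.Str.len token > 80
  · simp only [hlen, if_true]
  · simp only [hlen, Bool.false_eq_true, if_false]
    rw [yaraScan_eq _ 0 (by omega)]
    simp only [List.any_cons, List.any_nil, PySem.Str.isIn_eq, PySem.Str.count_eq]
    simp only [show ("\n" : String).toList = ['\n'] by decide,
      show ("\r" : String).toList = ['\r'] by decide,
      show ("\t" : String).toList = ['\t'] by decide,
      show ("\x00" : String).toList = ['\x00'] by decide,
      show ("/" : String).toList = ['/'] by decide,
      isIn_singleton_chars, count_singleton_char]
    generalize token.toList = l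
    by_cases hforb : ('\n' ∈ l ∨ '\r' ∈ l ∨ '\t' ∈ l ∨ '\x00' ∈ l)
    · have hc : (l.contains '\n' || (l.contains '\r' || (l.contains '\t' || (l.contains '\x00' || false)))) = true := by
        simp only [List.contains_eq_mem, Bool.or_eq_true, decide_eq_true_eq]
        tauto
      rw [if_pos hc]
      have hall : (l.all fun c => !(c = '\n' || c = '\r' || c = '\t' || c = '\x00')) = false := by
        rcases hforb with h | h | h | h <;>
        · refine List.all_eq_false.mpr ⟨_, h, ?_⟩; simp
      rw [hall, Bool.false_and]
    · have hc : (l.contains '\n' || (l.contains '\r' || (l.contains '\t' || (l.contains '\x00' || false)))) = false := by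
        simp only [List.contains_eq_mem, Bool.or_eq_false_iff, decide_eq_false_iff_not]
        tauto
      rw [if_neg (by rw [hc]; exact Bool.false_ne_true)]
      push_neg at hforb
      obtain ⟨hA, hB, hC, hD⟩ := hforb
      have hall : (l.all fun c => !(c = '\n' || c = '\r' || c = '\t' || c = '\x00')) = true := by
        refine List.all_eq_true.mpr (fun c hcmem => ?_)
        simp only [Bool.not_eq_true', Bool.or_eq_false_iff, decide_eq_false_iff_not]
        exact ⟨⟨⟨fun h => hA (h ▸ hcmem), fun h => hB (h ▸ hcmem)⟩, fun h => hC (h ▸ hcmem)⟩,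
          fun h => hD (h ▸ hcmem)⟩
      rw [hall, Bool.true_and]
      by_cases hcnt : l.count '/' > 6
      · rw [if_pos hcnt]
        symm
        simp only [decide_eq_false_iff_not]
        omega
      · rw [if_neg hcnt]
        symm
        simp only [decide_eq_true_eq]
        omega
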